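-- pv_equiv track=rewrite | github.com/ningyanhui/scheduler-dag | scheduler/utils.py | convert_date_format
-- ===== SOURCE A (Python) =====
-- def convert_date_format(format_str: str) -> str:
--     """
--     将自定义日期格式转换为Python的datetime格式
--
--     Args:
--         format_str: 自定义日期格式
--
--     Returns:
--         Python日期格式字符串
--     """
--     # 映射字典
--     mappings = {
--         'yyyy': '%Y',
--         'MM': '%m',
--         'dd': '%d',
--         'HH': '%H',
--         'mm': '%M',
--         'ss': '%S'
--     }
--
--     # 替换映射
--     result = format_str
--     for key, value in mappings.items():
--         result = result.replace(key, value)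
--
--     return result
-- ===== SOURCE B (Python) =====
-- def convert_date_format(format_str: str) -> str:
--     """
--     将自定义日期格式转换为Python的datetime格式
--
--     One greedy left-to-right pass over the input: at each position emit the
--     '%'-mapping of the first token of the original string, so a substituted
--     '%m' can never be re-matched by a later rule.
--     """
--     mappings = {
--         'yyyy': '%Y',
--         'MM': '%m',
--         'dd': '%d',
--         'HH': '%H',
--         'mm': '%M',
--         'ss': '%S'
--     }
--     out = []
--     i = 0
--     n = len(format_str)
--     while i < n:
--         for key, value in mappings.items():
--             if format_str.startswith(key, i):
--                 out.append(value)
--                 i += len(key)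
--                 break
--         else:
--             out.append(format_str[i])
--             i += 1
--     return ''.join(out)
-- ===== Notes on version B (the rewrite author's own statement) =====
-- stated objective: idiomatic
-- what changed: B replaces six sequential whole-string str.replace passes by a single greedy left-to-right tokenizer that matches each token against the original string at the current index, so substituted text is never re-scanned.
-- intended difference: On strings containing an even-length maximal run of 'M's (>=2) immediately followed by a lowercase 'm' (e.g. 'MMm'), A returns a corrupted format ('%%M': the 'm' of the substituted '%m' is re-matched by the later 'mm' replacement) while B returns '%mm', the intended tokenization of the original string. — e.g. on convert_date_format("MMm"): A returns "%%M", B returns "%mm"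
import Mathlib
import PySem

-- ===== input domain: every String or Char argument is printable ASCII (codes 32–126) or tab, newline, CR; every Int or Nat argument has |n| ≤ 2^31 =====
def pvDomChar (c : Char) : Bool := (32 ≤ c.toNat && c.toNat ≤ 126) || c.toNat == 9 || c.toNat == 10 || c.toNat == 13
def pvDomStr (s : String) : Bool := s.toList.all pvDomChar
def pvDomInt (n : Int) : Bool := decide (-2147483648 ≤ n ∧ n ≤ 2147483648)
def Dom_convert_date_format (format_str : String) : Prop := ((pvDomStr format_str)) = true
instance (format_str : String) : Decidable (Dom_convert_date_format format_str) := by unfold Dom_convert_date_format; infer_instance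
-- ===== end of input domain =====

-- B replaces A's six sequential whole-string replace passes by a single greedy left-to-right
-- tokenizer over the original string; on the D_ inputs below A's passes corrupt the output and
-- B returns the intended tokenization.

-- ===== PORT A =====
-- A: result = format_str; then result = result.replace(key, value) for the six mappings in dict order.
def convert_date_format (format_str : String) : String :=
  let result := format_str
  let result := PySem.Str.replace result "yyyy" "%Y"
  let result := PySem.Str.replace result "MM" "%m"
  let result := PySem.Str.replace result "dd" "%d"
  let result := PySem.Str.replace result "HH" "%H"
  let result := PySem.Str.replace result "mm" "%M"
  let result := PySem.Str.replace result "ss" "%S"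
  result

-- ===== PORT B =====
-- B-side helper: the while loop of Source B — at each position try the six tokens in dict order
-- (format_str.startswith(key, i)); on a match emit the mapping and skip the token, else copy the char.
def altGo : List Char → List Char
  | 'y' :: 'y' :: 'y' :: 'y' :: r => '%' :: 'Y' :: altGo r
  | 'M' :: 'M' :: r => '%' :: 'm' :: altGo r
  | 'd' :: 'd' :: r => '%' :: 'd' :: altGo r
  | 'H' :: 'H' :: r => '%' :: 'H' :: altGo r
  | 'm' :: 'm' :: r => '%' :: 'M' :: altGo r
  | 's' :: 's' :: r => '%' :: 'S' :: altGo r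
  | c :: r => c :: altGo r
  | [] => []

def convert_date_format_alt (format_str : String) : String :=
  String.ofList (altGo format_str.toList)

-- ===== PRECONDITION & SPEC =====
-- On strings with an even-length maximal run of ≥ 2 'M's immediately followed by 'm' (e.g. "MMm"),
-- A returns a corrupted format ("%%M": the 'm' of the substituted "%m" is re-matched by the later
-- 'mm' replacement) while B returns "%mm", the intended tokenization of the original string.
def badAux : List Char → Nat → Bool
  | [], _ => false
  | c :: r, k =>
    if c = 'M' then badAux r (k + 1)
    else if c = 'm' ∧ 2 ≤ k ∧ k % 2 = 0 then true
    else badAux r 0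

def D_convert_date_format (format_str : String) : Prop := badAux format_str.toList 0 = true
instance (format_str : String) : Decidable (D_convert_date_format format_str) := by
  unfold D_convert_date_format; infer_instance

def Spec_convert_date_format (format_str : String) (out : String) : Prop :=
  ¬ D_convert_date_format format_str → out = convert_date_format_alt format_str
instance (format_str : String) (out : String) : Decidable (Spec_convert_date_format format_str out) := by
  unfold Spec_convert_date_format; infer_instance

def pvDiffWitness_convert_date_format : String := "MMm"
def pvDiffWitnessOut_convert_date_format : String × String := ("%%M", "%mm")

-- ===== CLAIM (what is proved, stated in full; the proofs are below) =====
def Claim_unchanged_convert_date_format : Prop := ∀ (format_str : String), Dom_convert_date_format format_str → Spec_convert_date_format format_str (convert_date_format format_str)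
def Claim_changed_convert_date_format : Prop := Dom_convert_date_format (pvDiffWitness_convert_date_format) ∧ D_convert_date_format (pvDiffWitness_convert_date_format) ∧ convert_date_format (pvDiffWitness_convert_date_format) = pvDiffWitnessOut_convert_date_format.1 ∧ convert_date_format_alt (pvDiffWitness_convert_date_format) = pvDiffWitnessOut_convert_date_format.2 ∧ pvDiffWitnessOut_convert_date_format.1 ≠ pvDiffWitnessOut_convert_date_format.2
def Claim_exact_convert_date_format : Prop := ∀ (format_str : String), Dom_convert_date_format format_str → D_convert_date_format format_str → convert_date_format format_str ≠ convert_date_format_alt format_str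

-- ===== LEMMAS AND PROOFS =====
-- Characterisation of PySem.Chars.replace (nonempty pattern): nil, leftmost-skip and leftmost-match.

theorem go_acc (old new : List Char) :
    ∀ (fuel : Nat) (l acc : List Char),
      PySem.Chars.replace.go old new fuel l acc = acc.reverse ++ PySem.Chars.replace.go old new fuel l [] := by
  intro fuel
  induction fuel with
  | zero => intro l acc; simp [PySem.Chars.replace.go]
  | succ f ih =>
    intro l acc
    cases l with
    | nil => simp [PySem.Chars.replace.go]
    | cons c t =>
      simp only [PySem.Chars.replace.go]
      by_cases hp : old.isPrefixOf (c :: t)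
      · simp only [hp, if_true]
        rw [ih (List.drop old.length (c :: t)) (new.reverse ++ acc),
            ih (List.drop old.length (c :: t)) (new.reverse ++ [])]
        simp
      · simp only [hp, Bool.false_eq_true, if_false]
        rw [ih t (c :: acc), ih t [c]]
        simp
theorem go_fuel (old new : List Char) (hold : old ≠ []) :
    ∀ (f1 f2 : Nat) (l acc : List Char), l.length ≤ f1 → l.length ≤ f2 →
      PySem.Chars.replace.go old new f1 l acc = PySem.Chars.replace.go old new f2 l acc := by
  intro f1
  induction f1 with
  | zero =>
    intro f2 l acc h1 h2
    have : l = [] := by cases l <;> simp_all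
    subst this
    cases f2 <;> simp [PySem.Chars.replace.go]
  | succ f ih =>
    intro f2 l acc h1 h2
    have hol : 1 ≤ old.length := by cases old <;> simp_all
    cases l with
    | nil => cases f2 <;> simp [PySem.Chars.replace.go]
    | cons c t =>
      simp only [List.length_cons] at h1 h2
      cases f2 with
      | zero => omega
      | succ g =>
        simp only [PySem.Chars.replace.go]
        by_cases hp : old.isPrefixOf (c :: t)
        · simp only [hp, if_true]
          apply ih
          · simp only [List.length_drop, List.length_cons]; omega
          · simp only [List.length_drop, List.length_cons]; omega
        · simp only [hp, Bool.false_eq_true, if_false]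
          apply ih <;> omega
theorem replace_nil (old new : List Char) (hold : old ≠ []) :
    PySem.Chars.replace [] old new = [] := by
  simp [PySem.Chars.replace, PySem.Chars.replace.go, List.isEmpty_iff, hold]
theorem replace_skip (old new : List Char) (hold : old ≠ []) (c : Char) (r : List Char)
    (h : ¬ old.isPrefixOf (c :: r) = true) :
    PySem.Chars.replace (c :: r) old new = c :: PySem.Chars.replace r old new := by
  simp only [PySem.Chars.replace, List.isEmpty_iff, hold, List.length_cons, if_false]
  simp only [PySem.Chars.replace.go, h, Bool.false_eq_true, if_false]
  rw [go_acc old new r.length r [c]]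
  simp
theorem replace_match (old new : List Char) (hold : old ≠ []) (l : List Char)
    (h : old.isPrefixOf l = true) :
    PySem.Chars.replace l old new = new ++ PySem.Chars.replace (l.drop old.length) old new := by
  have hol : 1 ≤ old.length := by cases old <;> simp_all
  cases l with
  | nil =>
    exfalso; cases old with
    | nil => exact hold rfl
    | cons a o => simp [List.isPrefixOf] at h
  | cons c t =>
    simp only [PySem.Chars.replace, List.isEmpty_iff, hold, List.length_cons, if_false]
    simp only [PySem.Chars.replace.go, h, if_true]
    rw [go_acc old new t.length (List.drop old.length (c :: t)) (new.reverse ++ [])]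
    simp only [List.append_nil, List.reverse_reverse]
    congr 1
    apply go_fuel old new hold
    · simp only [List.length_drop, List.length_cons]; omega
    · simp

-- proof-layer defs
def chA (l : List Char) : List Char :=
  PySem.Chars.replace
    (PySem.Chars.replace
      (PySem.Chars.replace
        (PySem.Chars.replace
          (PySem.Chars.replace
            (PySem.Chars.replace l ['y','y','y','y'] ['%','Y'])
            ['M','M'] ['%','m'])
          ['d','d'] ['%','d'])
        ['H','H'] ['%','H'])
      ['m','m'] ['%','M'])
    ['s','s'] ['%','S']
def pm : Nat → List Char
  | 0 => []
  | j + 1 => '%' :: 'm' :: pm j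

-- convenience skips
theorem skip_head (p : Char) (olds new : List Char) (c : Char) (X : List Char) (h : c ≠ p) :
    PySem.Chars.replace (c :: X) (p :: olds) new = c :: PySem.Chars.replace X (p :: olds) new := by
  apply replace_skip _ _ (by simp) 
  simp [List.isPrefixOf]
  intro he; exact absurd he.symm h
theorem skip_head2 (p : Char) (olds new : List Char) (a b : Char) (X : List Char)
    (ha : a ≠ p) (hb : b ≠ p) :
    PySem.Chars.replace (a :: b :: X) (p :: olds) new = a :: b :: PySem.Chars.replace X (p :: olds) new := by
  rw [skip_head p olds new a _ ha, skip_head p olds new b _ hb]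
theorem skip2 (a b : Char) (new : List Char) (c : Char) (X : List Char)
    (h : c ≠ a ∨ X.head? ≠ some b) :
    PySem.Chars.replace (c :: X) [a, b] new = c :: PySem.Chars.replace X [a, b] new := by
  apply replace_skip _ _ (by simp)
  cases h with
  | inl h => simp [List.isPrefixOf]; intro he; exact absurd he.symm h
  | inr h => cases X with
    | nil => simp [List.isPrefixOf]
    | cons d r =>
      simp [List.isPrefixOf]
      intro _ he
      exact absurd (congrArg some he.symm) h
theorem match2 (a : Char) (new : List Char) (X : List Char) :
    PySem.Chars.replace (a :: a :: X) [a, a] new = new ++ PySem.Chars.replace X [a, a] new := by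
  rw [replace_match [a,a] new (by simp) _ (by simp [List.isPrefixOf])]
  simp
theorem head_ne_replace (old new l : List Char) (hold : old ≠ []) (hnew0 : new ≠ []) (ch : Char)
    (hnew : new.head? ≠ some ch) (hl : l.head? ≠ some ch) :
    (PySem.Chars.replace l old new).head? ≠ some ch := by
  cases l with
  | nil => rw [replace_nil _ _ hold]; simp
  | cons c t =>
    by_cases hp : old.isPrefixOf (c :: t)
    · rw [replace_match _ _ hold _ hp]
      cases new with
      | nil => exact absurd rfl hnew0
      | cons n ns => simpa using hnew
    · rw [replace_skip _ _ hold _ _ hp]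
      simpa using hl
theorem skip_replicate (p : Char) (olds new : List Char) (x : Char) (hx : x ≠ p) :
    ∀ (K : Nat) (w : List Char),
      PySem.Chars.replace (List.replicate K x ++ w) (p :: olds) new
        = List.replicate K x ++ PySem.Chars.replace w (p :: olds) new := by
  intro K
  induction K with
  | zero => simp
  | succ k ih =>
    intro w
    simp only [List.replicate_succ, List.cons_append]
    rw [skip_head p olds new x _ hx, ih]
theorem skip_pm_head (p : Char) (olds new : List Char) (h1 : '%' ≠ p) (h2 : 'm' ≠ p) :
    ∀ (j : Nat) (w : List Char),
      PySem.Chars.replace (pm j ++ w) (p :: olds) new = pm j ++ PySem.Chars.replace w (p :: olds) new := by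
  intro j
  induction j with
  | zero => simp [pm]
  | succ k ih =>
    intro w
    simp only [pm, List.cons_append]
    rw [skip_head p olds new '%' _ h1, skip_head p olds new 'm' _ h2, ih]
theorem skip_pm_mm (new : List Char) :
    ∀ (j : Nat) (w : List Char), w.head? ≠ some 'm' →
      PySem.Chars.replace (pm j ++ w) ['m','m'] new = pm j ++ PySem.Chars.replace w ['m','m'] new := by
  intro j
  induction j with
  | zero => intro w _; simp [pm]
  | succ k ih =>
    intro w hw
    simp only [pm, List.cons_append]
    rw [skip_head 'm' ['m'] new '%' _ (by decide)]
    rw [skip2 'm' 'm' new 'm' _ (Or.inr (by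
      cases k with
      | zero => simpa [pm] using hw
      | succ k' => simp [pm]))]
    rw [ih w hw]
theorem f2_run :
    ∀ (K : Nat) (w : List Char), w.head? ≠ some 'M' →
      PySem.Chars.replace (List.replicate K 'M' ++ w) ['M','M'] ['%','m']
        = pm (K / 2) ++ List.replicate (K % 2) 'M' ++ PySem.Chars.replace w ['M','M'] ['%','m'] := by
  intro K
  induction K using Nat.twoStepInduction with
  | zero => intro w _; simp [pm]
  | one =>
    intro w hw
    simp only [List.replicate_succ, List.replicate_zero, List.cons_append, List.nil_append]
    rw [skip2 'M' 'M' ['%','m'] 'M' w (Or.inr hw)]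
    simp [pm]
  | more K ih _ =>
    intro w hw
    have h2 : (K + 2) / 2 = K / 2 + 1 := by omega
    have h2' : (K + 2) % 2 = K % 2 := by omega
    rw [h2, h2']
    simp only [List.replicate_succ, List.cons_append]
    rw [match2 'M' ['%','m'] (List.replicate K 'M' ++ w)]
    rw [ih w hw]
    simp [pm]

theorem hneP (old : List Char) (ho : old ≠ []) (u : Char) (l : List Char) (ch : Char)
    (hch : ('%' : Char) ≠ ch) (hl : l.head? ≠ some ch) :
    (PySem.Chars.replace l old ['%', u]).head? ≠ some ch := by
  apply head_ne_replace old ['%', u] l ho (by simp) ch _ hl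
  simpa using hch

theorem altGo_generic (c : Char) (r : List Char)
    (hy : ¬ ['y','y','y','y'].isPrefixOf (c :: r) = true)
    (hM : ¬ ['M','M'].isPrefixOf (c :: r) = true)
    (hd : ¬ ['d','d'].isPrefixOf (c :: r) = true)
    (hH : ¬ ['H','H'].isPrefixOf (c :: r) = true)
    (hm : ¬ ['m','m'].isPrefixOf (c :: r) = true)
    (hs : ¬ ['s','s'].isPrefixOf (c :: r) = true) :
    altGo (c :: r) = c :: altGo r := by
  rw [altGo.eq_def]
  split
  · simp_all [List.isPrefixOf]
  · simp_all [List.isPrefixOf]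
  · simp_all [List.isPrefixOf]
  · simp_all [List.isPrefixOf]
  · simp_all [List.isPrefixOf]
  · simp_all [List.isPrefixOf]
  · rename_i c' r' h; injection h with h1 h2; rw [h1, h2]
  · simp_all

theorem bad_run : ∀ (K : Nat) (t : List Char) (k : Nat),
    badAux (List.replicate K 'M' ++ t) k = badAux t (k + K) := by
  intro K
  induction K with
  | zero => intro t k; simp
  | succ K ih =>
    intro t k
    simp only [List.replicate_succ, List.cons_append]
    have h1 : badAux ('M' :: (List.replicate K 'M' ++ t)) k = badAux (List.replicate K 'M' ++ t) (k + 1) := by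
      simp [badAux]
    rw [h1, ih, show k + 1 + K = k + (K + 1) by omega]

theorem run_extract : ∀ l : List Char, ∃ K t, l = List.replicate K 'M' ++ t ∧
    t.head? ≠ some 'M' ∧ (l.head? = some 'M' → 1 ≤ K) ∧ t.length + K = l.length := by
  intro l
  induction l with
  | nil => exact ⟨0, [], by simp⟩
  | cons c r ih =>
    by_cases hc : c = 'M'
    · obtain ⟨K, t, he, ht, _, hlen⟩ := ih
      exact ⟨K + 1, t, by simp [he, hc, List.replicate_succ], ht, fun _ => by omega,
        by simp; omega⟩
    · refine ⟨0, c :: r, by simp, by simpa using hc, fun h => absurd (by simpa using h) hc, by simp⟩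

theorem altGo_nil' : altGo [] = [] := rfl
theorem altGo_yyyy (r : List Char) : altGo ('y'::'y'::'y'::'y'::r) = '%'::'Y'::altGo r := rfl
theorem altGo_MM (r : List Char) : altGo ('M'::'M'::r) = '%'::'m'::altGo r := rfl
theorem altGo_dd (r : List Char) : altGo ('d'::'d'::r) = '%'::'d'::altGo r := rfl
theorem altGo_HH (r : List Char) : altGo ('H'::'H'::r) = '%'::'H'::altGo r := rfl
theorem altGo_mm (r : List Char) : altGo ('m'::'m'::r) = '%'::'M'::altGo r := rfl
theorem altGo_ss (r : List Char) : altGo ('s'::'s'::r) = '%'::'S'::altGo r := rfl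

theorem notpref_head (p : Char) (ps : List Char) (c : Char) (r : List Char) (h : c ≠ p) :
    ¬ (p :: ps).isPrefixOf (c :: r) = true := by
  simp [List.isPrefixOf]
  intro he
  exact absurd he.symm h

theorem notpref2 (a : Char) (r : List Char) (h : ¬ [a, a].isPrefixOf (a :: r) = true) :
    r.head? ≠ some a := by
  cases r with
  | nil => simp
  | cons d r' =>
    simp [List.isPrefixOf] at h
    simpa using fun hd => h hd.symm

theorem match4 (a : Char) (new : List Char) (X : List Char) :
    PySem.Chars.replace (a::a::a::a::X) [a,a,a,a] new = new ++ PySem.Chars.replace X [a,a,a,a] new := by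
  rw [replace_match [a,a,a,a] new (by simp) _ (by simp [List.isPrefixOf])]
  simp

theorem altGo_Mrun : ∀ (K : Nat) (t : List Char), t.head? ≠ some 'M' →
    altGo (List.replicate K 'M' ++ t) = pm (K / 2) ++ List.replicate (K % 2) 'M' ++ altGo t := by
  intro K
  induction K using Nat.twoStepInduction with
  | zero => intro t _; simp [pm]
  | one =>
    intro t ht
    simp only [List.replicate_one, List.cons_append, List.nil_append]
    rw [altGo_generic 'M' t (notpref_head _ _ _ _ (by decide))
      (by cases t with
        | nil => simp [List.isPrefixOf]
        | cons d r => simp [List.isPrefixOf]; intro hd; exact absurd (congrArg some hd.symm) ht)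
      (notpref_head _ _ _ _ (by decide)) (notpref_head _ _ _ _ (by decide))
      (notpref_head _ _ _ _ (by decide)) (notpref_head _ _ _ _ (by decide))]
    simp [pm]
  | more K ih _ =>
    intro t ht
    have h2 : (K + 2) / 2 = K / 2 + 1 := by omega
    have h2' : (K + 2) % 2 = K % 2 := by omega
    rw [h2, h2']
    simp only [List.replicate_succ, List.cons_append]
    rw [altGo_MM, ih t ht]
    simp [pm]

theorem pm_snoc : ∀ j : Nat, pm (j + 1) = pm j ++ ['%', 'm'] := by
  intro j
  induction j with
  | zero => rfl
  | succ k ih =>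
    show '%' :: 'm' :: pm (k + 1) = ('%' :: 'm' :: pm k) ++ ['%', 'm']
    rw [ih]
    simp

theorem f5_pm_m : ∀ (j : Nat) (Z : List Char),
    PySem.Chars.replace (pm (j + 1) ++ 'm' :: Z) ['m','m'] ['%','M']
      = pm j ++ '%' :: '%' :: 'M' :: PySem.Chars.replace Z ['m','m'] ['%','M'] := by
  intro j
  induction j with
  | zero =>
    intro Z
    simp only [pm, List.cons_append, List.nil_append]
    rw [skip_head 'm' ['m'] ['%','M'] '%' _ (by decide), match2 'm' ['%','M'] Z]
    simp
  | succ k ih =>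
    intro Z
    rw [show pm (k + 2) = '%' :: 'm' :: pm (k + 1) from rfl]
    simp only [List.cons_append]
    rw [skip_head 'm' ['m'] ['%','M'] '%' _ (by decide)]
    rw [skip2 'm' 'm' ['%','M'] 'm' _ (Or.inr (by cases k <;> simp [pm]))]
    rw [ih Z]
    simp [pm]

theorem bad_cons0 (c : Char) (r : List Char) (hc : c ≠ 'M') :
    badAux (c :: r) 0 = badAux r 0 := by
  simp [badAux, hc]

theorem bad_shift (t : List Char) (K : Nat) (ht : t.head? ≠ some 'M')
    (hns : ¬ (t.head? = some 'm' ∧ 2 ≤ K ∧ K % 2 = 0)) : badAux t K = badAux t 0 := by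
  cases t with
  | nil => rfl
  | cons c r =>
    have hc : c ≠ 'M' := by simpa using ht
    by_cases hcm : c = 'm'
    · subst hcm
      have h1 : ¬ (2 ≤ K ∧ K % 2 = 0) := by simpa using hns
      simp [badAux, h1]
    · simp [badAux, hc, hcm]

theorem chA_nil : chA [] = [] := by
  unfold chA
  rw [replace_nil _ _ (by simp), replace_nil _ _ (by simp), replace_nil _ _ (by simp),
      replace_nil _ _ (by simp), replace_nil _ _ (by simp), replace_nil _ _ (by simp)]

theorem chIff : ∀ (n : Nat) (l : List Char), l.length ≤ n →
    (chA l = altGo l ↔ badAux l 0 = false) := by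
  intro n
  induction n with
  | zero =>
    intro l hl
    have : l = [] := by cases l <;> simp_all
    subst this
    rw [chA_nil, altGo_nil']
    simp [badAux]
  | succ n ih =>
    intro l hl
    cases l with
    | nil => rw [chA_nil, altGo_nil']; simp [badAux]
    | cons c r =>
      simp only [List.length_cons, Nat.add_le_add_iff_right] at hl
      by_cases hcM : c = 'M'
      · -- M-run case
        subst hcM
        obtain ⟨K, t, hEq, htM, hK1, hLen⟩ := run_extract ('M' :: r)
        have hK : 1 ≤ K := hK1 (by simp)
        have hLen' : t.length ≤ n := by
          simp only [List.length_cons] at hLen; omega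
        rw [hEq]
        rw [bad_run K t 0]
        simp only [Nat.zero_add]
        have hYt : (PySem.Chars.replace t ['y','y','y','y'] ['%','Y']).head? ≠ some 'M' :=
          hneP _ (by simp) 'Y' t 'M' (by decide) htM
        have iht := ih t hLen'
        simp only [chA] at iht
        unfold chA
        rw [skip_replicate 'y' ['y','y','y'] ['%','Y'] 'M' (by decide) K t]
        rw [f2_run K _ hYt]
        rw [List.append_assoc]
        rw [altGo_Mrun K t htM, List.append_assoc]
        rcases Nat.mod_two_eq_zero_or_one K with he | he
        · -- even run
          have hK2 : 2 ≤ K := by omega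
          by_cases htm5 : t.head? = some 'm'
          · -- the difference point: even M-run followed by 'm'
            obtain ⟨a, t2, ht2⟩ : ∃ a t2, t = a :: t2 := by
              cases t with
              | nil => simp at htm5
              | cons a t2 => exact ⟨a, t2, rfl⟩
            subst ht2
            have ha : a = 'm' := by simpa using htm5
            subst ha
            rw [he]
            simp only [List.replicate_zero, List.nil_append]
            rw [skip_head 'y' ['y','y','y'] ['%','Y'] 'm' _ (by decide)]
            rw [skip_head 'M' ['M'] ['%','m'] 'm' _ (by decide)]
            rw [skip_pm_head 'd' ['d'] ['%','d'] (by decide) (by decide)]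
            rw [skip_head 'd' ['d'] ['%','d'] 'm' _ (by decide)]
            rw [skip_pm_head 'H' ['H'] ['%','H'] (by decide) (by decide)]
            rw [skip_head 'H' ['H'] ['%','H'] 'm' _ (by decide)]
            have hj : K / 2 = (K / 2 - 1) + 1 := by omega
            rw [hj]
            rw [f5_pm_m (K / 2 - 1) _]
            rw [skip_pm_head 's' ['s'] ['%','S'] (by decide) (by decide)]
            rw [skip_head 's' ['s'] ['%','S'] '%' _ (by decide)]
            rw [skip_head 's' ['s'] ['%','S'] '%' _ (by decide)]
            rw [skip_head 's' ['s'] ['%','S'] 'M' _ (by decide)]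
            rw [pm_snoc (K / 2 - 1)]
            rw [show badAux ('m' :: t2) K = true from by simp [badAux, hK2, he]]
            simp
          · -- even run not followed by 'm': no difference
            have hZm : (PySem.Chars.replace (PySem.Chars.replace (PySem.Chars.replace
                (PySem.Chars.replace t ['y','y','y','y'] ['%','Y']) ['M','M'] ['%','m'])
                ['d','d'] ['%','d']) ['H','H'] ['%','H']).head? ≠ some 'm' :=
              hneP _ (by simp) 'H' _ 'm' (by decide)
                (hneP _ (by simp) 'd' _ 'm' (by decide)
                  (hneP _ (by simp) 'm' _ 'm' (by decide)
                    (hneP _ (by simp) 'Y' _ 'm' (by decide) htm5)))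
            rw [he]
            simp only [List.replicate_zero, List.nil_append]
            rw [skip_pm_head 'd' ['d'] ['%','d'] (by decide) (by decide)]
            rw [skip_pm_head 'H' ['H'] ['%','H'] (by decide) (by decide)]
            rw [skip_pm_mm ['%','M'] (K / 2) _ hZm]
            rw [skip_pm_head 's' ['s'] ['%','S'] (by decide) (by decide)]
            rw [bad_shift t K htM (by rintro ⟨h1, _, _⟩; exact htm5 h1)]
            rw [List.append_right_inj]
            exact iht
        · -- odd run
          rw [he]
          simp only [List.replicate_one, List.cons_append, List.nil_append]
          rw [skip_pm_head 'd' ['d'] ['%','d'] (by decide) (by decide)]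
          rw [skip_head 'd' ['d'] ['%','d'] 'M' _ (by decide)]
          rw [skip_pm_head 'H' ['H'] ['%','H'] (by decide) (by decide)]
          rw [skip_head 'H' ['H'] ['%','H'] 'M' _ (by decide)]
          rw [skip_pm_mm ['%','M'] (K / 2) _ (by simp)]
          rw [skip_head 'm' ['m'] ['%','M'] 'M' _ (by decide)]
          rw [skip_pm_head 's' ['s'] ['%','S'] (by decide) (by decide)]
          rw [skip_head 's' ['s'] ['%','S'] 'M' _ (by decide)]
          rw [bad_shift t K htM (by rintro ⟨_, _, h3⟩; omega)]
          rw [List.append_right_inj]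
          exact Iff.trans (by simp) iht
      · by_cases hy : ['y','y','y','y'].isPrefixOf (c :: r) = true
        · -- yyyy case
          obtain ⟨s, hs⟩ := List.isPrefixOf_iff_prefix.mp hy
          obtain ⟨h1, h2⟩ : c = 'y' ∧ r = 'y'::'y'::'y'::s := by
            injection hs.symm with ha hb
            exact ⟨ha, by simpa using hb⟩
          subst h1; subst h2
          have iht := ih s (by simp at hl; omega)
          simp only [chA] at iht
          unfold chA
          rw [match4 'y' ['%','Y'] s]
          simp only [List.cons_append, List.nil_append]
          rw [skip_head2 'M' ['M'] ['%','m'] '%' 'Y' _ (by decide) (by decide)]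
          rw [skip_head2 'd' ['d'] ['%','d'] '%' 'Y' _ (by decide) (by decide)]
          rw [skip_head2 'H' ['H'] ['%','H'] '%' 'Y' _ (by decide) (by decide)]
          rw [skip_head2 'm' ['m'] ['%','M'] '%' 'Y' _ (by decide) (by decide)]
          rw [skip_head2 's' ['s'] ['%','S'] '%' 'Y' _ (by decide) (by decide)]
          rw [altGo_yyyy]
          rw [show badAux ('y'::'y'::'y'::'y'::s) 0 = badAux s 0 from by simp [badAux]]
          exact Iff.trans (by simp) iht
        · by_cases hdd : ['d','d'].isPrefixOf (c :: r) = true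
          · obtain ⟨s, hs⟩ := List.isPrefixOf_iff_prefix.mp hdd
            obtain ⟨h1, h2⟩ : c = 'd' ∧ r = 'd'::s := by
              injection hs.symm with ha hb
              exact ⟨ha, by simpa using hb⟩
            subst h1; subst h2
            have iht := ih s (by simp at hl; omega)
            simp only [chA] at iht
            unfold chA
            rw [skip_head2 'y' ['y','y','y'] ['%','Y'] 'd' 'd' _ (by decide) (by decide)]
            rw [skip_head2 'M' ['M'] ['%','m'] 'd' 'd' _ (by decide) (by decide)]
            rw [match2 'd' ['%','d'] _]
            simp only [List.cons_append, List.nil_append]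
            rw [skip_head2 'H' ['H'] ['%','H'] '%' 'd' _ (by decide) (by decide)]
            rw [skip_head2 'm' ['m'] ['%','M'] '%' 'd' _ (by decide) (by decide)]
            rw [skip_head2 's' ['s'] ['%','S'] '%' 'd' _ (by decide) (by decide)]
            rw [altGo_dd]
            rw [show badAux ('d'::'d'::s) 0 = badAux s 0 from by simp [badAux]]
            exact Iff.trans (by simp) iht
          · by_cases hHH : ['H','H'].isPrefixOf (c :: r) = true
            · obtain ⟨s, hs⟩ := List.isPrefixOf_iff_prefix.mp hHH
              obtain ⟨h1, h2⟩ : c = 'H' ∧ r = 'H'::s := by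
                injection hs.symm with ha hb
                exact ⟨ha, by simpa using hb⟩
              subst h1; subst h2
              have iht := ih s (by simp at hl; omega)
              simp only [chA] at iht
              unfold chA
              rw [skip_head2 'y' ['y','y','y'] ['%','Y'] 'H' 'H' _ (by decide) (by decide)]
              rw [skip_head2 'M' ['M'] ['%','m'] 'H' 'H' _ (by decide) (by decide)]
              rw [skip_head2 'd' ['d'] ['%','d'] 'H' 'H' _ (by decide) (by decide)]
              rw [match2 'H' ['%','H'] _]
              simp only [List.cons_append, List.nil_append]
              rw [skip_head2 'm' ['m'] ['%','M'] '%' 'H' _ (by decide) (by decide)]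
              rw [skip_head2 's' ['s'] ['%','S'] '%' 'H' _ (by decide) (by decide)]
              rw [altGo_HH]
              rw [show badAux ('H'::'H'::s) 0 = badAux s 0 from by simp [badAux]]
              exact Iff.trans (by simp) iht
            · by_cases hmm : ['m','m'].isPrefixOf (c :: r) = true
              · obtain ⟨s, hs⟩ := List.isPrefixOf_iff_prefix.mp hmm
                obtain ⟨h1, h2⟩ : c = 'm' ∧ r = 'm'::s := by
                  injection hs.symm with ha hb
                  exact ⟨ha, by simpa using hb⟩
                subst h1; subst h2
                have iht := ih s (by simp at hl; omega)
                simp only [chA] at iht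
                unfold chA
                rw [skip_head2 'y' ['y','y','y'] ['%','Y'] 'm' 'm' _ (by decide) (by decide)]
                rw [skip_head2 'M' ['M'] ['%','m'] 'm' 'm' _ (by decide) (by decide)]
                rw [skip_head2 'd' ['d'] ['%','d'] 'm' 'm' _ (by decide) (by decide)]
                rw [skip_head2 'H' ['H'] ['%','H'] 'm' 'm' _ (by decide) (by decide)]
                rw [match2 'm' ['%','M'] _]
                simp only [List.cons_append, List.nil_append]
                rw [skip_head2 's' ['s'] ['%','S'] '%' 'M' _ (by decide) (by decide)]
                rw [altGo_mm]
                rw [show badAux ('m'::'m'::s) 0 = badAux s 0 from by simp [badAux]]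
                exact Iff.trans (by simp) iht
              · by_cases hss : ['s','s'].isPrefixOf (c :: r) = true
                · obtain ⟨s, hs⟩ := List.isPrefixOf_iff_prefix.mp hss
                  obtain ⟨h1, h2⟩ : c = 's' ∧ r = 's'::s := by
                    injection hs.symm with ha hb
                    exact ⟨ha, by simpa using hb⟩
                  subst h1; subst h2
                  have iht := ih s (by simp at hl; omega)
                  simp only [chA] at iht
                  unfold chA
                  rw [skip_head2 'y' ['y','y','y'] ['%','Y'] 's' 's' _ (by decide) (by decide)]
                  rw [skip_head2 'M' ['M'] ['%','m'] 's' 's' _ (by decide) (by decide)]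
                  rw [skip_head2 'd' ['d'] ['%','d'] 's' 's' _ (by decide) (by decide)]
                  rw [skip_head2 'H' ['H'] ['%','H'] 's' 's' _ (by decide) (by decide)]
                  rw [skip_head2 'm' ['m'] ['%','M'] 's' 's' _ (by decide) (by decide)]
                  rw [match2 's' ['%','S'] _]
                  simp only [List.cons_append, List.nil_append]
                  rw [altGo_ss]
                  rw [show badAux ('s'::'s'::s) 0 = badAux s 0 from by simp [badAux]]
                  exact Iff.trans (by simp) iht
                · -- generic case
                  have iht := ih r hl
                  simp only [chA] at iht
                  have h3 : c ≠ 'd' ∨ (PySem.Chars.replace (PySem.Chars.replace r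
                      ['y','y','y','y'] ['%','Y']) ['M','M'] ['%','m']).head? ≠ some 'd' := by
                    by_cases hcd : c = 'd'
                    · subst hcd
                      exact Or.inr (hneP _ (by simp) 'm' _ 'd' (by decide)
                        (hneP _ (by simp) 'Y' _ 'd' (by decide) (notpref2 'd' r hdd)))
                    · exact Or.inl hcd
                  have h4 : c ≠ 'H' ∨ (PySem.Chars.replace (PySem.Chars.replace (PySem.Chars.replace r
                      ['y','y','y','y'] ['%','Y']) ['M','M'] ['%','m']) ['d','d'] ['%','d']).head? ≠ some 'H' := by
                    by_cases hcH : c = 'H'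
                    · subst hcH
                      exact Or.inr (hneP _ (by simp) 'd' _ 'H' (by decide)
                        (hneP _ (by simp) 'm' _ 'H' (by decide)
                          (hneP _ (by simp) 'Y' _ 'H' (by decide) (notpref2 'H' r hHH))))
                    · exact Or.inl hcH
                  have h5 : c ≠ 'm' ∨ (PySem.Chars.replace (PySem.Chars.replace (PySem.Chars.replace
                      (PySem.Chars.replace r ['y','y','y','y'] ['%','Y']) ['M','M'] ['%','m'])
                      ['d','d'] ['%','d']) ['H','H'] ['%','H']).head? ≠ some 'm' := by
                    by_cases hcm : c = 'm'
                    · subst hcm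
                      exact Or.inr (hneP _ (by simp) 'H' _ 'm' (by decide)
                        (hneP _ (by simp) 'd' _ 'm' (by decide)
                          (hneP _ (by simp) 'm' _ 'm' (by decide)
                            (hneP _ (by simp) 'Y' _ 'm' (by decide) (notpref2 'm' r hmm)))))
                    · exact Or.inl hcm
                  have h6 : c ≠ 's' ∨ (PySem.Chars.replace (PySem.Chars.replace (PySem.Chars.replace
                      (PySem.Chars.replace (PySem.Chars.replace r ['y','y','y','y'] ['%','Y'])
                      ['M','M'] ['%','m']) ['d','d'] ['%','d']) ['H','H'] ['%','H'])
                      ['m','m'] ['%','M']).head? ≠ some 's' := by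
                    by_cases hcs : c = 's'
                    · subst hcs
                      exact Or.inr (hneP _ (by simp) 'M' _ 's' (by decide)
                        (hneP _ (by simp) 'H' _ 's' (by decide)
                          (hneP _ (by simp) 'd' _ 's' (by decide)
                            (hneP _ (by simp) 'm' _ 's' (by decide)
                              (hneP _ (by simp) 'Y' _ 's' (by decide) (notpref2 's' r hss))))))
                    · exact Or.inl hcs
                  unfold chA
                  rw [replace_skip ['y','y','y','y'] ['%','Y'] (by simp) c r hy]
                  rw [skip_head 'M' ['M'] ['%','m'] c _ hcM]
                  rw [skip2 'd' 'd' ['%','d'] c _ h3]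
                  rw [skip2 'H' 'H' ['%','H'] c _ h4]
                  rw [skip2 'm' 'm' ['%','M'] c _ h5]
                  rw [skip2 's' 's' ['%','S'] c _ h6]
                  rw [altGo_generic c r hy (notpref_head _ _ _ _ hcM) hdd hHH hmm hss]
                  rw [bad_cons0 c r hcM]
                  exact Iff.trans (by simp) iht

-- ===== VERDICT (by name: the statement is the Claim_ definition above) =====
theorem convert_date_format_spec : Claim_unchanged_convert_date_format := by
  intro s _ hD
  have hb : badAux s.toList 0 = false := by
    unfold D_convert_date_format at hD
    exact Bool.not_eq_true _ ▸ (by simpa using hD)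
  show convert_date_format s = convert_date_format_alt s
  unfold convert_date_format convert_date_format_alt
  simp only [PySem.Str.replace, String.toList_ofList]
  have h4 : ("yyyy" : String).toList = ['y','y','y','y'] := rfl
  have h4' : ("%Y" : String).toList = ['%','Y'] := rfl
  rw [h4, h4']
  exact congrArg String.ofList (by
    have := (chIff s.toList.length s.toList le_rfl).mpr hb
    simp only [chA] at this
    simpa using this)

theorem convert_date_format_changed : Claim_changed_convert_date_format := by
  unfold Claim_changed_convert_date_format; decide

theorem convert_date_format_tight : Claim_exact_convert_date_format := by
  intro s _ hD hEq
  have h2 : chA s.toList = altGo s.toList := by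
    have h1 := congrArg String.toList hEq
    unfold convert_date_format convert_date_format_alt at h1
    simp only [PySem.Str.replace, String.toList_ofList] at h1
    have h4 : ("yyyy" : String).toList = ['y','y','y','y'] := rfl
    have h4' : ("%Y" : String).toList = ['%','Y'] := rfl
    rw [h4, h4'] at h1
    simpa [chA] using h1
  have hb := (chIff s.toList.length s.toList le_rfl).mp h2
  unfold D_convert_date_format at hD
  rw [hD] at hb
  exact absurd hb (by simp)
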